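-- pv_equiv track=rewrite | github.com/kh277/BOJ | 백준/Unrated/34457. Sunny Days/Sunny Days.py | solve
-- ===== SOURCE A (Python) =====
-- def solve(N, data):
--     # S가 존재하는 구간 저장
--     gap = []
--     start = -1
--     for i in range(N):
--         if start == -1 and data[i] == 1:
--             start = i
--         elif start != -1 and data[i] == 0:
--             gap.append([start, i-1])
--             start = -1
--     if start != -1:
--         gap.append([start, N-1])
--
--     # 반례 처리
--     if len(gap) == 1 and gap[0][0] == 0 and gap[0][1] == N-1:
--         return N-1
--
--     # 두 구간의 차이가 1일 때 합치기
--     result = 1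
--     if len(gap) > 0:
--         result = max([min(e-s+2, N) for s, e in gap])
--     for i in range(1, len(gap)):
--         if gap[i][0] - gap[i-1][1] == 2:
--             result = max(result, gap[i][1]-gap[i-1][0]+1)
--
--     return result
-- ===== SOURCE B (Python) =====
-- def solve(N, data):
--     # One streaming pass: track the current run of 1-days, the last finished
--     # run, and fold the per-run / merged-run scores into `result` on the fly
--     # (no gap list, no second pass).
--     result = 1
--     cur = None      # start index of the current run
--     prev = None     # (start, end) of the last finished run
--     runs = 0
--     for i in range(N):
--         if cur is None:
--             if data[i] == 1:
--                 cur = i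
--         elif data[i] == 0:
--             e = i - 1
--             if prev is not None and cur - prev[1] == 2:
--                 result = max(result, e - prev[0] + 1)
--             result = max(result, min(e - cur + 2, N))
--             prev = (cur, e)
--             runs += 1
--             cur = None
--     if cur is not None:
--         e = N - 1
--         if prev is not None and cur - prev[1] == 2:
--             result = max(result, e - prev[0] + 1)
--         result = max(result, min(e - cur + 2, N))
--         prev = (cur, e)
--         runs += 1
--     if runs == 1 and prev == (0, N - 1):
--         return N - 1
--     return result
-- ===== Notes on version B (the rewrite author's own statement) =====
-- stated objective: alternative
-- what changed: A builds a list of sunny runs and then makes two more passes over it (a comprehension max and an index loop over adjacent runs); B makes a single streaming pass over the days, folding each finished run's score and the one-zero-apart merge score into the running result with O(1) extra state.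
import Mathlib
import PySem

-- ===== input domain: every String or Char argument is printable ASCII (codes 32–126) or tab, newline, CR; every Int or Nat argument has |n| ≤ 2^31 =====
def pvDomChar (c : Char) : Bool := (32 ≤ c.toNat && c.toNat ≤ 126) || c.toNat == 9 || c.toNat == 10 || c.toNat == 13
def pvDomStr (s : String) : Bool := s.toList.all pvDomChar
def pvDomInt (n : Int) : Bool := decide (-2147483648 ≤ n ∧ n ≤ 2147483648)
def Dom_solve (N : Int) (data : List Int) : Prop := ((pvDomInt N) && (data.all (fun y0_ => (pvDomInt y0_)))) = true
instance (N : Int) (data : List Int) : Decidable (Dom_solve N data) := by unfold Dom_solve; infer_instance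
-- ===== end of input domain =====

-- B replaces A's gap-list construction plus two further passes over it (a comprehension max
-- and an index loop over adjacent gaps) by a single streaming pass folding scores into the
-- running result; same return value on the stated domain.

-- ===== PORT A =====
-- A's first loop: collect (start, end) runs, sentinel start = -1
def stepA (data : List Int) (st : List (Int × Int) × Int) (i : Int) : List (Int × Int) × Int :=
  if st.2 == -1 && PySem.List.pyGetD data i 0 == 1 then (st.1, i)
  else if st.2 != -1 && PySem.List.pyGetD data i 0 == 0 then (st.1 ++ [(st.2, i - 1)], -1)
  else st

-- A after the first loop: trailing append, special case, comprehension max, merge loop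
def aTail (N : Int) (s : List (Int × Int) × Int) : Int :=
  let gap := if s.2 != -1 then s.1 ++ [(s.2, N - 1)] else s.1
  if gap.length == 1 && (PySem.List.pyGetD gap 0 ((0:Int), (0:Int))).1 == 0
      && (PySem.List.pyGetD gap 0 ((0:Int), (0:Int))).2 == N - 1 then
    N - 1
  else
    let result : Int :=
      if 0 < gap.length then
        (PySem.List.max? (gap.map (fun p => min (p.2 - p.1 + 2) N)) (fun x => x)).getD 1
      else 1
    (PySem.List.pyRange 1 (gap.length : Int) 1).foldl
      (fun r i =>
        if (PySem.List.pyGetD gap i ((0:Int),(0:Int))).1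
            - (PySem.List.pyGetD gap (i - 1) ((0:Int),(0:Int))).2 == 2 then
          max r ((PySem.List.pyGetD gap i ((0:Int),(0:Int))).2
            - (PySem.List.pyGetD gap (i - 1) ((0:Int),(0:Int))).1 + 1)
        else r) result

def solve (N : Int) (data : List Int) : Int :=
  aTail N ((PySem.List.pyRange 0 N 1).foldl (stepA data) ([], -1))

-- ===== PORT B =====
-- B's loop body: state = (result, cur, prev, runs)
def stepB (N : Int) (data : List Int) (st : Int × Option Int × Option (Int × Int) × Int)
    (i : Int) : Int × Option Int × Option (Int × Int) × Int :=
  match st.2.1 with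
  | none => if PySem.List.pyGetD data i 0 == 1 then (st.1, some i, st.2.2.1, st.2.2.2) else st
  | some c =>
    if PySem.List.pyGetD data i 0 == 0 then
      let e := i - 1
      let r1 := match st.2.2.1 with
        | some p => if c - p.2 == 2 then max st.1 (e - p.1 + 1) else st.1
        | none => st.1
      (max r1 (min (e - c + 2) N), none, some (c, e), st.2.2.2 + 1)
    else st

-- B after the loop: close the trailing run, then the all-ones check
def bTail (N : Int) (s : Int × Option Int × Option (Int × Int) × Int) : Int :=
  let s2 : Int × Option (Int × Int) × Int :=
    match s.2.1 with
    | some c =>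
      let e := N - 1
      let r1 := match s.2.2.1 with
        | some p => if c - p.2 == 2 then max s.1 (e - p.1 + 1) else s.1
        | none => s.1
      (max r1 (min (e - c + 2) N), some (c, e), s.2.2.2 + 1)
    | none => (s.1, s.2.2.1, s.2.2.2)
  if s2.2.2 == 1 && s2.2.1 == some ((0:Int), N - 1) then N - 1 else s2.1

def solve_alt (N : Int) (data : List Int) : Int :=
  bTail N ((PySem.List.pyRange 0 N 1).foldl (stepB N data) (1, none, none, 0))

-- ===== PRECONDITION & SPEC =====
-- Pre_ excludes exactly the inputs where Python A raises IndexError: 0 < N and N > len(data).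
def Pre_solve (N : Int) (data : List Int) : Prop := N ≤ (data.length : Int) ∨ N ≤ 0
instance (N : Int) (data : List Int) : Decidable (Pre_solve N data) := by
  unfold Pre_solve; infer_instance

def pvWitness_solve : Int × List Int := (3, [1, 0, 1])

def Spec_solve (N : Int) (data : List Int) (out : Int) : Prop := out = solve_alt N data
instance (N : Int) (data : List Int) (out : Int) : Decidable (Spec_solve N data out) := by
  unfold Spec_solve; infer_instance

-- ===== CLAIM (what is proved, stated in full; the proofs are below) =====
def Claim_equal_solve : Prop := ∀ (N : Int) (data : List Int), Dom_solve N data → Pre_solve N data → Spec_solve N data (solve N data)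

-- ===== LEMMAS AND PROOFS =====

-- per-run score
def runScore (N : Int) (q : Int × Int) : Int := min (q.2 - q.1 + 2) N

-- accumulate one finished run into (result, prev)
def fin (N : Int) (rp : Int × Option (Int × Int)) (q : Int × Int) : Int × Option (Int × Int) :=
  (max (match rp.2 with
        | some p => if q.1 - p.2 == 2 then max rp.1 (q.2 - p.1 + 1) else rp.1
        | none => rp.1)
       (runScore N q), some q)

def optOf (st : Int) : Option Int := if st == -1 then none else some st

-- coupling between A's (gap, start) and B's state
def mk (N : Int) (g : List (Int × Int)) (st : Int) : Int × Option Int × Option (Int × Int) × Int :=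
  ((g.foldl (fin N) (1, none)).1, optOf st, (g.foldl (fin N) (1, none)).2, (g.length : Int))

-- adjacent-merge recursion
def mrg : (Int × Int) → List (Int × Int) → Int → Int
  | _, [], r => r
  | p, q :: t, r => mrg q t (if q.1 - p.2 == 2 then max r (q.2 - p.1 + 1) else r)

-- merge step on an adjacent pair
def mstep (r : Int) (pq : (Int × Int) × (Int × Int)) : Int :=
  if pq.2.1 - pq.1.2 == 2 then max r (pq.2.2 - pq.1.1 + 1) else r

def WF (N : Int) (g : List (Int × Int)) : Prop := ∀ p ∈ g, 0 ≤ p.1 ∧ p.1 ≤ p.2 ∧ p.2 < N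

theorem foldl_max_init (l : List Int) (a b : Int) :
    l.foldl max (max a b) = max (l.foldl max a) b := by
  induction l generalizing a b with
  | nil => rfl
  | cons x t ih =>
    simp only [List.foldl_cons]
    rw [show max (max a b) x = max (max a x) b by omega, ih]

theorem fst_foldl_fin (N : Int) (t : List (Int × Int)) (p : Int × Int) (r : Int) :
    (t.foldl (fin N) (r, some p)).1 = mrg p t ((t.map (runScore N)).foldl max r) := by
  induction t generalizing p r with
  | nil => rfl
  | cons q t ih =>
    simp only [List.foldl_cons, List.map_cons, mrg, fin]
    rw [ih]
    split_ifs with h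
    · rw [show max (max r (q.2 - p.1 + 1)) (runScore N q)
            = max (max r (runScore N q)) (q.2 - p.1 + 1) by omega,
          foldl_max_init]
    · rfl

theorem bisim_step (N : Int) (data : List Int) (g : List (Int × Int)) (st i : Int)
    (hi : 0 ≤ i) :
    stepB N data (mk N g st) i = mk N (stepA data (g, st) i).1 (stepA data (g, st) i).2 := by
  by_cases hst : st = -1
  · subst hst
    simp only [stepA, mk, optOf, stepB]
    by_cases hd : PySem.List.pyGetD data i 0 == 1
    · simp [hd, show ¬ i = -1 by omega]
    · simp [hd]
  · simp only [stepA, mk, optOf, stepB, show (st == -1) = false by simpa using hst,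
      Bool.false_and, show (st != -1) = true by simpa using hst, Bool.true_and,
      if_neg (Bool.false_ne_true)]
    by_cases hd : PySem.List.pyGetD data i 0 == 0
    · simp only [hd, if_true, List.foldl_append, List.foldl_cons, List.foldl_nil]
      simp only [fin, runScore, List.length_append, List.length_cons, List.length_nil]
      refine Prod.ext rfl (Prod.ext rfl (Prod.ext rfl ?_))
      push_cast; ring
    · simp [hd, hst]

theorem bisim (N : Int) (data : List Int) (idxs : List Int) (hpos : ∀ i ∈ idxs, 0 ≤ i)
    (g : List (Int × Int)) (st : Int) :
    idxs.foldl (stepB N data) (mk N g st)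
      = mk N (idxs.foldl (stepA data) (g, st)).1 (idxs.foldl (stepA data) (g, st)).2 := by
  induction idxs generalizing g st with
  | nil => rfl
  | cons i t ih =>
    simp only [List.foldl_cons]
    rw [bisim_step N data g st i (hpos i (by simp)), ih (fun j hj => hpos j (by simp [hj]))]

theorem wf_aux (N : Int) (data : List Int) (k : Nat) :
    ∀ (a : Int) (g : List (Int × Int)) (st : Int), 0 ≤ a → a ≤ N → (N - a).toNat ≤ k →
    WF N g → (st ≠ -1 → 0 ≤ st ∧ st < a) →
    WF N ((PySem.List.pyRange a N 1).foldl (stepA data) (g, st)).1 ∧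
    (((PySem.List.pyRange a N 1).foldl (stepA data) (g, st)).2 ≠ -1 →
      0 ≤ ((PySem.List.pyRange a N 1).foldl (stepA data) (g, st)).2 ∧
      ((PySem.List.pyRange a N 1).foldl (stepA data) (g, st)).2 < N) := by
  induction k with
  | zero =>
    intro a g st h0 hN hk hg hst
    have : a = N := by omega
    subst this
    rw [PySem.List.pyRange_one_eq_nil (le_refl _)]
    simp only [List.foldl_nil]
    exact ⟨hg, fun h => ⟨(hst h).1, by have := (hst h).2; omega⟩⟩
  | succ k ih =>
    intro a g st h0 hN hk hg hst
    by_cases ha : a = N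
    · subst ha
      rw [PySem.List.pyRange_one_eq_nil (le_refl _)]
      simp only [List.foldl_nil]
      exact ⟨hg, fun h => ⟨(hst h).1, by have := (hst h).2; omega⟩⟩
    · have haN : a < N := lt_of_le_of_ne hN ha
      rw [PySem.List.pyRange_one_cons haN]
      simp only [List.foldl_cons]
      have hstep : WF N (stepA data (g, st) a).1 ∧
          ((stepA data (g, st) a).2 ≠ -1 →
            0 ≤ (stepA data (g, st) a).2 ∧ (stepA data (g, st) a).2 < a + 1) := by
        simp only [stepA]
        split_ifs with h1 h2
        · exact ⟨hg, fun _ => by omega⟩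
        · refine ⟨fun p hp => ?_, fun h => absurd rfl h⟩
          rcases List.mem_append.mp hp with h | h
          · exact hg p h
          · simp at h
            have hne : st ≠ -1 := by
              simp only [Bool.and_eq_true, bne_iff_ne] at h2
              exact h2.1
            have := hst hne
            subst h
            simp only
            omega
        · exact ⟨hg, fun h => by have := hst h; omega⟩
      exact ih (a + 1) (stepA data (g, st) a).1 (stepA data (g, st) a).2 (by omega) (by omega)
        (by omega) hstep.1 hstep.2

-- the pyRange-indexed merge loop reads exactly the adjacent pairs
theorem map_pyRange_adj (g : List (Int × Int)) :
    (PySem.List.pyRange 1 (g.length : Int) 1).map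
      (fun i => (PySem.List.pyGetD g (i - 1) ((0:Int),(0:Int)), PySem.List.pyGetD g i ((0:Int),(0:Int))))
      = g.zip g.tail := by
  apply List.ext_getElem
  · simp only [List.length_map, PySem.List.length_pyRange_one, List.length_zip,
      List.length_tail]
    omega
  · intro k h1 h2
    simp only [List.getElem_map, PySem.List.getElem_pyRange_one, List.getElem_zip,
      List.getElem_tail]
    have hlen : k + 1 < g.length := by
      simp [PySem.List.length_pyRange_one] at h1
      omega
    have e1 : (1 : Int) + (k : Int) - 1 = ((k : Nat) : Int) := by push_cast; ring
    have e2 : (1 : Int) + (k : Int) = (((k + 1 : Nat) : Nat) : Int) := by push_cast; ring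
    rw [e1, e2, PySem.List.pyGetD_natCast, PySem.List.pyGetD_natCast,
      List.getD_eq_getElem _ _ (by omega), List.getD_eq_getElem _ _ hlen]

theorem zip_foldl_mrg (t : List (Int × Int)) (p : Int × Int) (r : Int) :
    ((p :: t).zip t).foldl mstep r = mrg p t r := by
  induction t generalizing p r with
  | nil => rfl
  | cons q t ih =>
    simp only [List.zip_cons_cons, List.foldl_cons]
    exact ih q (mstep r (p, q))

theorem mergeloop_eq_mrg (p : Int × Int) (t : List (Int × Int)) (r : Int) :
    (PySem.List.pyRange 1 (((p :: t).length : Nat) : Int) 1).foldl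
      (fun r i =>
        if (PySem.List.pyGetD (p :: t) i ((0:Int),(0:Int))).1
            - (PySem.List.pyGetD (p :: t) (i - 1) ((0:Int),(0:Int))).2 == 2 then
          max r ((PySem.List.pyGetD (p :: t) i ((0:Int),(0:Int))).2
            - (PySem.List.pyGetD (p :: t) (i - 1) ((0:Int),(0:Int))).1 + 1)
        else r) r = mrg p t r := by
  have hbody : (fun (r : Int) (i : Int) =>
      if (PySem.List.pyGetD (p :: t) i ((0:Int),(0:Int))).1
          - (PySem.List.pyGetD (p :: t) (i - 1) ((0:Int),(0:Int))).2 == 2 then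
        max r ((PySem.List.pyGetD (p :: t) i ((0:Int),(0:Int))).2
          - (PySem.List.pyGetD (p :: t) (i - 1) ((0:Int),(0:Int))).1 + 1)
      else r)
    = (fun r i => mstep r
        (PySem.List.pyGetD (p :: t) (i - 1) ((0:Int),(0:Int)),
         PySem.List.pyGetD (p :: t) i ((0:Int),(0:Int)))) := rfl
  rw [hbody, ← List.foldl_map, map_pyRange_adj, List.tail_cons, zip_foldl_mrg]

-- A's tail computation on a gap list equals the fin-fold
theorem final_eq (N : Int) (gap : List (Int × Int)) (hwf : WF N gap) :
    (if gap.length == 1 && (PySem.List.pyGetD gap 0 ((0:Int), (0:Int))).1 == 0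
        && (PySem.List.pyGetD gap 0 ((0:Int), (0:Int))).2 == N - 1 then
      N - 1
    else
      (PySem.List.pyRange 1 (gap.length : Int) 1).foldl
        (fun r i =>
          if (PySem.List.pyGetD gap i ((0:Int),(0:Int))).1
              - (PySem.List.pyGetD gap (i - 1) ((0:Int),(0:Int))).2 == 2 then
            max r ((PySem.List.pyGetD gap i ((0:Int),(0:Int))).2
              - (PySem.List.pyGetD gap (i - 1) ((0:Int),(0:Int))).1 + 1)
          else r)
        (if 0 < gap.length then
          (PySem.List.max? (gap.map (fun p => min (p.2 - p.1 + 2) N)) (fun x => x)).getD 1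
        else 1))
    = (if ((gap.length : Nat) : Int) == 1
          && (gap.foldl (fin N) (1, none)).2 == some ((0:Int), N - 1) then N - 1
       else (gap.foldl (fin N) (1, none)).1) := by
  match gap with
  | [] =>
    rw [show ((([] : List (Int × Int)).length : Nat) : Int) = 0 from rfl,
      PySem.List.pyRange_one_eq_nil (by omega)]
    simp
  | [x] =>
    obtain ⟨h1, h2, h3⟩ := hwf x (by simp)
    have hfx : (1:Int) ≤ min (x.2 - x.1 + 2) N := by omega
    by_cases hc : x = ((0:Int), N - 1)
    · subst hc
      simp [fin]
    · have hA : ((x.1 == 0) && (x.2 == N - 1)) = false := by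
        by_cases e1 : x.1 = 0 <;> by_cases e2 : x.2 = N - 1 <;>
          simp_all [Prod.ext_iff]
      have hcb : ((some x : Option (Int × Int)) == some ((0:Int), N - 1)) = false := by
        simp [hc]
      simp only [List.length_cons, List.length_nil, PySem.List.pyGetD_zero_cons,
        List.foldl_cons, List.foldl_nil, fin, runScore]
      rw [hcb]
      simp only [Bool.and_false, if_false]
      rw [show ((0 + 1 : Nat) == 1) = true from rfl, Bool.true_and, hA]
      simp only [Bool.false_eq_true, if_false]
      rw [show (((0 + 1 : Nat) : Nat) : Int) = 1 from by norm_num,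
        PySem.List.pyRange_one_eq_nil (by omega)]
      simp only [List.foldl_nil, List.map_cons, List.map_nil, if_pos (Nat.succ_pos 0)]
      rw [PySem.List.max?_id_cons]
      simp only [List.foldl_nil, Option.getD_some]
      omega
  | x :: y :: t =>
    obtain ⟨h1, h2, h3⟩ := hwf x (by simp)
    have hfx : (1:Int) ≤ min (x.2 - x.1 + 2) N := by omega
    have hlen1 : ((x :: y :: t).length == 1) = false := by
      rw [beq_eq_false_iff_ne]
      simp only [List.length_cons]
      omega
    have hlen2 : ((((x :: y :: t).length : Nat) : Int) == 1) = false := by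
      rw [beq_eq_false_iff_ne]
      simp only [List.length_cons]
      push_cast
      omega
    rw [hlen1, hlen2]
    simp only [Bool.false_and, if_false]
    rw [if_pos (show 0 < (x :: y :: t).length by simp)]
    simp only [List.map_cons]
    rw [PySem.List.max?_id_cons]
    simp only [Option.getD_some]
    rw [mergeloop_eq_mrg x (y :: t)]
    have hr : (fun (p : Int × Int) => min (p.2 - p.1 + 2) N) = runScore N := rfl
    rw [hr]
    have : ((x :: y :: t).foldl (fin N) (1, none)).1
        = ((y :: t).foldl (fin N) (max 1 (runScore N x), some x)).1 := rfl
    rw [this, fst_foldl_fin, show max 1 (runScore N x) = runScore N x from by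
      simp only [runScore]; omega]
    rfl

theorem tail_eq (N : Int) (s : List (Int × Int) × Int) (hwf : WF N s.1)
    (hst : s.2 ≠ -1 → 0 ≤ s.2 ∧ s.2 < N) : aTail N s = bTail N (mk N s.1 s.2) := by
  obtain ⟨g, st⟩ := s
  by_cases h : st = -1
  · subst h
    have e1 : aTail N (g, -1)
        = (if g.length == 1 && (PySem.List.pyGetD g 0 ((0:Int), (0:Int))).1 == 0
              && (PySem.List.pyGetD g 0 ((0:Int), (0:Int))).2 == N - 1 then
            N - 1
          else
            (PySem.List.pyRange 1 (g.length : Int) 1).foldl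
              (fun r i =>
                if (PySem.List.pyGetD g i ((0:Int),(0:Int))).1
                    - (PySem.List.pyGetD g (i - 1) ((0:Int),(0:Int))).2 == 2 then
                  max r ((PySem.List.pyGetD g i ((0:Int),(0:Int))).2
                    - (PySem.List.pyGetD g (i - 1) ((0:Int),(0:Int))).1 + 1)
                else r)
              (if 0 < g.length then
                (PySem.List.max? (g.map (fun p => min (p.2 - p.1 + 2) N)) (fun x => x)).getD 1
              else 1)) := by
      simp [aTail]
    have e2 : bTail N (mk N g (-1))
        = (if ((g.length : Nat) : Int) == 1
              && (g.foldl (fin N) (1, none)).2 == some ((0:Int), N - 1) then N - 1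
           else (g.foldl (fin N) (1, none)).1) := by
      simp [bTail, mk, optOf]
    rw [e1, e2]
    exact final_eq N g hwf
  · obtain ⟨hst0, hstN⟩ := hst h
    have hwf' : WF N (g ++ [(st, N - 1)]) := by
      intro p hp
      rcases List.mem_append.mp hp with hp | hp
      · exact hwf p hp
      · simp only [List.mem_singleton] at hp
        subst hp
        exact ⟨hst0, by omega, by omega⟩
    have e1 : aTail N (g, st)
        = (if (g ++ [(st, N - 1)]).length == 1
              && (PySem.List.pyGetD (g ++ [(st, N - 1)]) 0 ((0:Int), (0:Int))).1 == 0
              && (PySem.List.pyGetD (g ++ [(st, N - 1)]) 0 ((0:Int), (0:Int))).2 == N - 1 then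
            N - 1
          else
            (PySem.List.pyRange 1 ((g ++ [(st, N - 1)]).length : Int) 1).foldl
              (fun r i =>
                if (PySem.List.pyGetD (g ++ [(st, N - 1)]) i ((0:Int),(0:Int))).1
                    - (PySem.List.pyGetD (g ++ [(st, N - 1)]) (i - 1) ((0:Int),(0:Int))).2 == 2 then
                  max r ((PySem.List.pyGetD (g ++ [(st, N - 1)]) i ((0:Int),(0:Int))).2
                    - (PySem.List.pyGetD (g ++ [(st, N - 1)]) (i - 1) ((0:Int),(0:Int))).1 + 1)
                else r)
              (if 0 < (g ++ [(st, N - 1)]).length then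
                (PySem.List.max? ((g ++ [(st, N - 1)]).map (fun p => min (p.2 - p.1 + 2) N))
                  (fun x => x)).getD 1
              else 1)) := by
      simp only [aTail, show (st != -1) = true from by simp [h], if_true]
    have e2 : bTail N (mk N g st)
        = (if (((g ++ [(st, N - 1)]).length : Nat) : Int) == 1
              && ((g ++ [(st, N - 1)]).foldl (fin N) (1, none)).2 == some ((0:Int), N - 1) then
            N - 1
           else ((g ++ [(st, N - 1)]).foldl (fin N) (1, none)).1) := by
      simp only [bTail, mk, optOf, show (st == -1) = false from by simp [h], Bool.false_eq_true,
        if_false, List.foldl_append, List.foldl_cons, List.foldl_nil, fin, runScore,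
        List.length_append, List.length_cons, List.length_nil]
      rw [show ((g.length + (0 + 1) : Nat) : Int) = (g.length : Int) + 1 from by push_cast; ring]
    rw [e1, e2]
    exact final_eq N (g ++ [(st, N - 1)]) hwf'

theorem solve_eq (N : Int) (data : List Int) : solve N data = solve_alt N data := by
  have hpos : ∀ i ∈ PySem.List.pyRange 0 N 1, 0 ≤ i :=
    fun i hi => ((PySem.List.mem_pyRange_one.mp hi).1)
  have hinit : ((1, none, none, 0) : Int × Option Int × Option (Int × Int) × Int)
      = mk N [] (-1) := by
    simp [mk, optOf]
  have hinv : WF N ((PySem.List.pyRange 0 N 1).foldl (stepA data) ([], -1)).1 ∧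
      (((PySem.List.pyRange 0 N 1).foldl (stepA data) ([], -1)).2 ≠ -1 →
        0 ≤ ((PySem.List.pyRange 0 N 1).foldl (stepA data) ([], -1)).2 ∧
        ((PySem.List.pyRange 0 N 1).foldl (stepA data) ([], -1)).2 < N) := by
    by_cases hN : N ≤ 0
    · rw [PySem.List.pyRange_one_eq_nil hN]
      simp only [List.foldl_nil]
      exact ⟨fun p hp => by simp at hp, fun hh => absurd rfl hh⟩
    · exact wf_aux N data N.toNat 0 [] (-1) (le_refl 0) (by omega) (by omega)
        (fun p hp => by simp at hp) (fun hh => absurd rfl hh)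
  unfold solve solve_alt
  rw [hinit, bisim N data _ hpos [] (-1)]
  exact tail_eq N _ hinv.1 hinv.2

-- ===== VERDICT (by name: the statement is the Claim_ definition above) =====
theorem solve_spec : Claim_equal_solve := by
  intro N data _ _
  unfold Spec_solve
  exact solve_eq N data
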